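-- pv_equiv track=rewrite | github.com/ravikiranjois1/personal-projects | Language_Classifier/trainer.py | all_same_classification
-- ===== SOURCE A (Python) =====
-- def all_same_classification(examples):
--     """
--     Check if all the sentences belong to the same language
--     :param examples:
--     :return: Boolean value
--     """
--     class_name = examples[1][0]
--     count = 0
--     for item in examples[1:]:
--         if item[0] == class_name:
--             count += 1
--     if count == len(examples) - 1 or count == 0:
--         return True
--     else:
--         return False
-- ===== SOURCE B (Python) =====
-- def all_same_classification(examples):
--     labels = [item[0] for item in examples[1:]]
--     return all(x == y for x, y in zip(labels, labels[1:]))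
-- ===== Notes on version B (the rewrite author's own statement) =====
-- stated objective: simpler
-- what changed: Drops the reference label and the match-count arithmetic entirely: B extracts the label list once and checks equality of every adjacent pair (a chain comparison via zip), instead of counting matches against examples[1][0] and testing count==len-1 or count==0.
import Mathlib
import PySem

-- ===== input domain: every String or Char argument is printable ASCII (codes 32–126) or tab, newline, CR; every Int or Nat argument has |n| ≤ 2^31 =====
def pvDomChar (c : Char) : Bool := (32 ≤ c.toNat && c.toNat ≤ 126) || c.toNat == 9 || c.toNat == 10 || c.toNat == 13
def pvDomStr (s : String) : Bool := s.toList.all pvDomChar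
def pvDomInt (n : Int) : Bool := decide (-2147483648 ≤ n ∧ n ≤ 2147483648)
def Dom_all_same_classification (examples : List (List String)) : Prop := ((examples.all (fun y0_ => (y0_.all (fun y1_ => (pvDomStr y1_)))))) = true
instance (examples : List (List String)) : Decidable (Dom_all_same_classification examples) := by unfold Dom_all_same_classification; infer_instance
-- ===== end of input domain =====

-- B replaces A's reference-label match counting and count==len-1-or-0 arithmetic with a chain comparison of adjacent labels (objective: simpler).


-- ===== PORT A =====
-- literal transliteration of A: examples[1][0] via pyGet? (none = IndexError, arbitrary false outside Pre_),
-- loop over examples[1:] counting matching first elements (item[0] as pyGetD — exact under Pre_),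
-- then count == len(examples) - 1 or count == 0.
def all_same_classification (examples : List (List String)) : Bool :=
  match PySem.List.pyGet? examples 1 with
  | none => false
  | some e1 =>
    match PySem.List.pyGet? e1 0 with
    | none => false
    | some class_name =>
      let count : Int :=
        (PySem.List.slice examples (some 1) none).foldl
          (fun c item => if PySem.List.pyGetD item 0 "" == class_name then c + 1 else c) 0
      decide (count = (examples.length : Int) - 1 ∨ count = 0)

-- ===== PORT B =====
-- literal transliteration of B: label list [item[0] for item in examples[1:]] (item[0] as pyGetD — exact under Pre_),
-- then all adjacent pairs of zip(labels, labels[1:]) equal.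
def all_same_classification_alt (examples : List (List String)) : Bool :=
  let labels := (PySem.List.slice examples (some 1) none).map
    (fun item => PySem.List.pyGetD item 0 "")
  (labels.zip (PySem.List.slice labels (some 1) none)).all (fun p => p.1 == p.2)

-- ===== PRECONDITION & SPEC =====
-- Pre_ excludes exactly the inputs where the Python A raises IndexError:
-- fewer than two examples (examples[1] fails) or an empty item in examples[1:] (item[0] fails).
def Pre_all_same_classification (examples : List (List String)) : Prop :=
  2 ≤ examples.length ∧ ∀ item ∈ examples.drop 1, item ≠ []
instance (examples : List (List String)) : Decidable (Pre_all_same_classification examples) := by unfold Pre_all_same_classification; infer_instance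

def pvWitness_all_same_classification : List (List String) := [["en", "hello"], ["en", "world"], ["en", "hi"]]

def Spec_all_same_classification (examples : List (List String)) (out : Bool) : Prop := out = all_same_classification_alt examples
instance (examples : List (List String)) (out : Bool) : Decidable (Spec_all_same_classification examples out) := by unfold Spec_all_same_classification; infer_instance

-- ===== CLAIM (what is proved, stated in full; the proofs are below) =====
def Claim_equal_all_same_classification : Prop := ∀ (examples : List (List String)), Dom_all_same_classification examples → Pre_all_same_classification examples → Spec_all_same_classification examples (all_same_classification examples)


-- ===== LEMMAS AND PROOFS =====

-- A's loop starting from c computes c plus the number of matching items.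
theorem pvFoldl_count (cn : String) (l : List (List String)) (c : Int) :
    (l.foldl (fun c item => if PySem.List.pyGetD item 0 "" == cn then c + 1 else c) c)
      = c + l.countP (fun item => PySem.List.pyGetD item 0 "" == cn) := by
  induction l generalizing c with
  | nil => simp
  | cons x xs ih =>
    simp only [List.foldl_cons, List.countP_cons, ih]
    split_ifs with hcase
    · push_cast
      omega
    · omega

-- B's adjacent-pair chain over h :: l holds iff every element of l equals h.
theorem pvChain_all (l : List String) (h : String) :
    (((h :: l).zip l).all (fun p => p.1 == p.2)) = l.all (fun x => x == h) := by
  induction l generalizing h with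
  | nil => simp
  | cons a t ih =>
    simp only [List.zip_cons_cons, List.all_cons, ih]
    by_cases hha : h = a
    · subst hha; simp
    · have h1 : (h == a) = false := by simp [hha]
      have h2 : (a == h) = false := by
        simp only [beq_eq_false_iff_ne, ne_eq]
        exact fun e => hha (Eq.symm e)
      simp [h1, h2]

-- ===== VERDICT (by name: the statement is the Claim_ definition above) =====
theorem all_same_classification_spec : Claim_equal_all_same_classification := by
  unfold Claim_equal_all_same_classification
  intro examples _ hpre
  obtain ⟨hlen, hne⟩ := hpre
  obtain ⟨a, e1, rest, rfl⟩ : ∃ a e1 rest, examples = a :: e1 :: rest := by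
    match examples, hlen with
    | a :: e1 :: rest, _ => exact ⟨a, e1, rest, rfl⟩
  · have he1 : e1 ≠ [] := hne e1 (by simp)
    obtain ⟨h0, t1, rfl⟩ : ∃ h0 t1, e1 = h0 :: t1 := by
      cases e1 with
      | nil => exact absurd rfl he1
      | cons h t => exact ⟨h, t, rfl⟩
    unfold Spec_all_same_classification all_same_classification all_same_classification_alt
    have hg1 : PySem.List.pyGet? (a :: (h0 :: t1) :: rest) 1 = some (h0 :: t1) := by
      simp [PySem.List.pyGet?, PySem.List.pyIdx?]
    have hg0 : PySem.List.pyGet? (h0 :: t1) 0 = some h0 := by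
      simp [PySem.List.pyGet?, PySem.List.pyIdx?]
    simp only [hg1, hg0]
    have hs1 : PySem.List.slice (a :: (h0 :: t1) :: rest) (some 1) none = (h0 :: t1) :: rest := by
      have := PySem.List.slice_from_natCast (a :: (h0 :: t1) :: rest) 1
      simpa using this
    rw [hs1]
    simp only [List.map_cons]
    have hgD : PySem.List.pyGetD (h0 :: t1) 0 "" = h0 := by
      simp [PySem.List.pyGetD]
    rw [hgD]
    set L := rest.map (fun item => PySem.List.pyGetD item 0 "") with hL
    have hsl : PySem.List.slice (h0 :: L) (some 1) none = L := by
      have := PySem.List.slice_from_natCast (h0 :: L) 1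
      simpa using this
    rw [hsl, pvChain_all]
    rw [List.foldl_cons, pvFoldl_count]
    have hm : PySem.List.pyGetD (h0 :: t1) 0 "" == h0 := by
      simp [PySem.List.pyGetD]
    rw [if_pos hm]
    rw [Bool.eq_iff_iff, decide_eq_true_eq, List.all_eq_true]
    have hiff : (∀ x ∈ L, (x == h0) = true)
        ↔ rest.countP (fun item => PySem.List.pyGetD item 0 "" == h0) = rest.length := by
      rw [List.countP_eq_length]
      constructor
      · intro h itm hitm
        simpa using h _ (List.mem_map_of_mem hitm)
      · intro h x hx
        rcases List.mem_map.mp hx with ⟨itm, hitm, rfl⟩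
        simpa using h itm hitm
    rw [hiff]
    have hle : rest.countP (fun item => PySem.List.pyGetD item 0 "" == h0) ≤ rest.length :=
      List.countP_le_length
    simp only [List.length_cons]
    push_cast
    omega
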